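-- pv_equiv track=rewrite | github.com/BeBoop-Beep/EVRCalculator | backend/db/services/pokemon_era_set_sync_service.py | _summarize_missing_metadata
-- ===== SOURCE A (Python) =====
-- from typing import Any, Dict, Iterable, List, Optional, Tuple
--
-- def _summarize_missing_metadata(set_rows: Iterable[Dict[str, Any]]) -> Dict[str, int]:
--     rows = list(set_rows)
--     return {
--         "missing_release_date": sum(1 for row in rows if not row.get("release_date")),
--         "missing_abbreviation": sum(1 for row in rows if not row.get("abbreviation")),
--         "missing_set_type": sum(1 for row in rows if not row.get("set_type")),
--         "missing_set_code": sum(1 for row in rows if not row.get("set_code")),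
--         "missing_pokemon_api_set_id": sum(1 for row in rows if not row.get("pokemon_api_set_id")),
--         "missing_symbol_image_url": sum(1 for row in rows if not row.get("symbol_image_url")),
--         "missing_logo_image_url": sum(1 for row in rows if not row.get("logo_image_url")),
--         "missing_card_details_url": sum(1 for row in rows if not row.get("card_details_url")),
--         "missing_sealed_details_url": sum(1 for row in rows if not row.get("sealed_details_url")),
--     }
-- ===== SOURCE B (Python) =====
-- from typing import Any, Dict, Iterable, List, Optional, Tuple
--
-- _FIELDS = [
--     "release_date",
--     "abbreviation",
--     "set_type",
--     "set_code",
--     "pokemon_api_set_id",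
--     "symbol_image_url",
--     "logo_image_url",
--     "card_details_url",
--     "sealed_details_url",
-- ]
--
-- def _summarize_missing_metadata(set_rows: Iterable[Dict[str, Any]]) -> Dict[str, int]:
--     counts = [0] * len(_FIELDS)
--     for row in list(set_rows):
--         counts = [c + (0 if row.get(f) else 1) for f, c in zip(_FIELDS, counts)]
--     return {"missing_" + f: c for f, c in zip(_FIELDS, counts)}
-- ===== Notes on version B (the rewrite author's own statement) =====
-- stated objective: simpler
-- what changed: Nine independent full scans of the rows (one generator-sum per field) are replaced by a single pass over the rows that updates a vector of nine counters zipped with a field-name table; the result dict is built from that table.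
import Mathlib
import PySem

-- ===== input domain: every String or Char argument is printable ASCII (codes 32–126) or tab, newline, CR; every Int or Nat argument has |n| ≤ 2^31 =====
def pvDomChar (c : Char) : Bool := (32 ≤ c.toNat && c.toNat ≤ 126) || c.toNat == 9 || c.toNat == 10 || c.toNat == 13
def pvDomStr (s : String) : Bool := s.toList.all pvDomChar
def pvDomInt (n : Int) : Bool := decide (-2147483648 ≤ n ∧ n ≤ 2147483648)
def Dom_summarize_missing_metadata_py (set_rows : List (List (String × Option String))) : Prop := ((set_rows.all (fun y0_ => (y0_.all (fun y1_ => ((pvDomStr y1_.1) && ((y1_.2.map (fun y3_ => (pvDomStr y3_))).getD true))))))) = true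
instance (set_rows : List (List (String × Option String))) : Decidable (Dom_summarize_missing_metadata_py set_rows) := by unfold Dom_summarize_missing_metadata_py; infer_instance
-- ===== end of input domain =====

-- One pass over the rows maintaining nine counters zipped with a field table, instead of
-- nine independent full scans of the rows (objective: simpler, one traversal).


-- ===== PORT A =====
-- Python truthiness of row.get(f): missing key, None and "" are falsy.
def pvFalsy (v : Option (Option String)) : Bool :=
  match v with
  | some (some s) => s = ""
  | _ => true

-- sum(1 for row in rows if not row.get(f))   (row is a dict; get = first match, exact via Dict.mk)
def pvCountMissing (rows : List (List (String × Option String))) (f : String) : Int :=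
  rows.foldl (fun acc row => if pvFalsy ((PySem.Dict.mk row).get? f) then acc + 1 else acc) 0

def summarize_missing_metadata_py (set_rows : List (List (String × Option String))) : List (String × Int) :=
  [("missing_release_date", pvCountMissing set_rows "release_date"),
   ("missing_abbreviation", pvCountMissing set_rows "abbreviation"),
   ("missing_set_type", pvCountMissing set_rows "set_type"),
   ("missing_set_code", pvCountMissing set_rows "set_code"),
   ("missing_pokemon_api_set_id", pvCountMissing set_rows "pokemon_api_set_id"),
   ("missing_symbol_image_url", pvCountMissing set_rows "symbol_image_url"),
   ("missing_logo_image_url", pvCountMissing set_rows "logo_image_url"),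
   ("missing_card_details_url", pvCountMissing set_rows "card_details_url"),
   ("missing_sealed_details_url", pvCountMissing set_rows "sealed_details_url")]

-- ===== PORT B =====
def pvFields : List String :=
  ["release_date", "abbreviation", "set_type", "set_code", "pokemon_api_set_id",
   "symbol_image_url", "logo_image_url", "card_details_url", "sealed_details_url"]

def summarize_missing_metadata_py_alt (set_rows : List (List (String × Option String))) : List (String × Int) :=
  let counts :=
    set_rows.foldl
      (fun cs row =>
        List.zipWith (fun f c => c + (if pvFalsy ((PySem.Dict.mk row).get? f) then 1 else 0)) pvFields cs)
      (pvFields.map (fun _ => (0 : Int)))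
  List.zipWith (fun f c => ("missing_" ++ f, c)) pvFields counts

-- ===== PRECONDITION & SPEC =====
def Spec_summarize_missing_metadata_py (set_rows : List (List (String × Option String))) (out : List (String × Int)) : Prop := out = summarize_missing_metadata_py_alt set_rows
instance (set_rows : List (List (String × Option String))) (out : List (String × Int)) : Decidable (Spec_summarize_missing_metadata_py set_rows out) := by unfold Spec_summarize_missing_metadata_py; infer_instance

-- ===== CLAIM (what is proved, stated in full; the proofs are below) =====
def Claim_equal_summarize_missing_metadata_py : Prop := ∀ (set_rows : List (List (String × Option String))), Dom_summarize_missing_metadata_py set_rows → Spec_summarize_missing_metadata_py set_rows (summarize_missing_metadata_py set_rows)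

-- ===== LEMMAS AND PROOFS =====

-- Pointwise update of a table: zipWith over a list and its own map.
theorem zipWith_map_self {α β : Type} (u : α → β → β) (g : α → β) (l : List α) :
    List.zipWith u l (l.map g) = l.map (fun a => u a (g a)) := by
  induction l with
  | nil => rfl
  | cons x xs ih => simp [ih]

-- The one-pass counter fold equals the per-field folds.
theorem foldl_zipWith_counts {ρ α : Type} (step : ρ → α → Int → Int)
    (rows : List ρ) (fields : List α) (g : α → Int) :
    rows.foldl (fun cs row => List.zipWith (fun f c => step row f c) fields cs) (fields.map g)
      = fields.map (fun f => rows.foldl (fun c row => step row f c) (g f)) := by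
  induction rows generalizing g with
  | nil => rfl
  | cons r rs ih =>
      simp only [List.foldl_cons]
      rw [zipWith_map_self, ih]

-- ===== VERDICT (by name: the statement is the Claim_ definition above) =====
theorem summarize_missing_metadata_py_spec : Claim_equal_summarize_missing_metadata_py := by
  intro set_rows _
  show summarize_missing_metadata_py set_rows = summarize_missing_metadata_py_alt set_rows
  unfold summarize_missing_metadata_py_alt
  rw [foldl_zipWith_counts (fun row f c => c + (if pvFalsy ((PySem.Dict.mk row).get? f) then 1 else 0))]
  have hb : ∀ f : String,
      set_rows.foldl (fun c row => c + (if pvFalsy ((PySem.Dict.mk row).get? f) then 1 else 0)) 0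
        = pvCountMissing set_rows f := by
    intro f
    unfold pvCountMissing
    congr 1
    funext c row
    split <;> omega
  simp only [pvFields, List.map_cons, List.map_nil, List.zipWith_cons_cons, List.zipWith_nil_right, hb]
  rfl
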